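-- pv_equiv track=rewrite | github.com/IKnowThatIKnowNothin/AtD-Bot | TP.py | calculate_arrival
-- ===== SOURCE A (Python) =====
-- def calculate_arrival(path, month, half):
--     hops = len(path) - 1  # Number of region-to-region transitions
--
--     if hops == 0:
--         # Same region: next half-month
--         return (month, "B") if half == "A" else ((month % 9) + 1, "A")
--
--     # Each additional region = +1 month
--     month += hops
--     while month > 9:
--         month -= 9  # Wrap around to 1 after month 9
--
--     return month, half
-- ===== SOURCE B (Python) =====
-- def calculate_arrival(path, month, half):
--     if len(path) == 1:
--         # Same region: advance one half-month via a transition table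
--         return {"A": (month, "B")}.get(half, (month % 9 + 1, "A"))
--     m = month + len(path) - 1
--     if m > 9:
--         m = m % 9 or 9  # wrap into 1..9 in one step
--     return m, half
-- ===== Notes on version B (the rewrite author's own statement) =====
-- stated objective: simpler
-- what changed: Dispatches the same-region case through a transition table instead of a conditional expression, and replaces the repeated-subtraction wrap loop with a single 'm % 9 or 9' closed form.
import Mathlib
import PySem

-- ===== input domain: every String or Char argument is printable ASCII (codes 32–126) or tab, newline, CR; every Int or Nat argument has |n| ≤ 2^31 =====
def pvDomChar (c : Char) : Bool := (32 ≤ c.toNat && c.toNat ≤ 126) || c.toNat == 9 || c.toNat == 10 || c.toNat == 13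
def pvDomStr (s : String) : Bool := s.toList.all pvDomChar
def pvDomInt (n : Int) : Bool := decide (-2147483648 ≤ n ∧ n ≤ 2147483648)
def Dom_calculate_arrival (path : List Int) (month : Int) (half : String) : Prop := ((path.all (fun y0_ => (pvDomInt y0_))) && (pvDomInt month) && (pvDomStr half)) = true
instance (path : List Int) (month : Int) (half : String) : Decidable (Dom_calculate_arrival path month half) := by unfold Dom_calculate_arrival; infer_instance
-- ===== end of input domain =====

-- B dispatches the same-region step through a transition table and wraps the month with 'm % 9 or 9' instead of A's subtraction loop (objective: simpler).

-- ===== PORT A =====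
-- the `while month > 9: month -= 9` loop of A, as structural recursion on month
def calcArrWrapLoop (month : Int) : Int :=
  if month > 9 then calcArrWrapLoop (month - 9) else month
termination_by month.toNat
decreasing_by omega

def calculate_arrival (path : List Int) (month : Int) (half : String) : Int × String :=
  let hops : Int := (path.length : Int) - 1
  if hops = 0 then
    if half = "A" then (month, "B") else (PySem.Int.mod month 9 + 1, "A")
  else
    (calcArrWrapLoop (month + hops), half)

-- ===== PORT B =====
def calculate_arrival_alt (path : List Int) (month : Int) (half : String) : Int × String :=
  if (path.length : Int) = 1 then
    -- {"A": (month, "B")}.get(half, (month % 9 + 1, "A"))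
    (PySem.Dict.ofList [("A", (month, "B"))]).getD half (PySem.Int.mod month 9 + 1, "A")
  else
    let m := month + (path.length : Int) - 1
    -- m % 9 or 9 (Python 'or': first truthy operand)
    ((if m > 9 then (if PySem.Int.mod m 9 = 0 then 9 else PySem.Int.mod m 9) else m), half)

-- ===== PRECONDITION & SPEC =====
def Spec_calculate_arrival (path : List Int) (month : Int) (half : String) (out : Int × String) : Prop := out = calculate_arrival_alt path month half
instance (path : List Int) (month : Int) (half : String) (out : Int × String) : Decidable (Spec_calculate_arrival path month half out) := by unfold Spec_calculate_arrival; infer_instance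

-- ===== CLAIM (what is proved, stated in full; the proofs are below) =====
def Claim_equal_calculate_arrival : Prop := ∀ (path : List Int) (month : Int) (half : String), Dom_calculate_arrival path month half → Spec_calculate_arrival path month half (calculate_arrival path month half)

-- ===== LEMMAS AND PROOFS =====

-- A's wrap loop equals B's 'm % 9 or 9' closed form, for every integer month
theorem calcArrWrapLoop_eq (m : Int) :
    calcArrWrapLoop m =
      if m > 9 then (if PySem.Int.mod m 9 = 0 then 9 else PySem.Int.mod m 9) else m := by
  induction m using calcArrWrapLoop.induct with
  | case1 m h ih =>
    rw [calcArrWrapLoop, if_pos h, ih, if_pos h]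
    rw [PySem.Int.mod_eq_emod_of_pos (a := m - 9) (by omega),
        PySem.Int.mod_eq_emod_of_pos (a := m) (by omega)]
    have h9 : (m - 9) % 9 = m % 9 := by omega
    have hlt : 0 ≤ m % 9 ∧ m % 9 < 9 := ⟨Int.emod_nonneg m (by omega), Int.emod_lt_of_pos m (by omega)⟩
    split_ifs with h1 h2 <;> omega
  | case2 m h =>
    rw [calcArrWrapLoop, if_neg h, if_neg h]

-- the singleton-table lookup of B equals A's conditional on half
theorem calcArr_table_eq (month : Int) (half : String) :
    (PySem.Dict.ofList [("A", (month, "B"))]).getD half (PySem.Int.mod month 9 + 1, "A")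
      = if half = "A" then (month, "B") else (PySem.Int.mod month 9 + 1, "A") := by
  by_cases h : half = "A" <;>
    simp [PySem.Dict.ofList, PySem.Dict.getD, PySem.Dict.get?, PySem.Dict.update, PySem.Dict.insert,
          PySem.Dict.empty, h, eq_comm (a := "A")]

-- ===== VERDICT (by name: the statement is the Claim_ definition above) =====
theorem calculate_arrival_spec : Claim_equal_calculate_arrival := by
  intro path month half _
  unfold Spec_calculate_arrival calculate_arrival calculate_arrival_alt
  simp only [calcArrWrapLoop_eq, calcArr_table_eq]
  have he : month + ((path.length : Int) - 1) = month + (path.length : Int) - 1 := by ring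
  rw [he]
  split_ifs <;> first | rfl | (exfalso; omega)
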